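-- pv_equiv track=rewrite | github.com/Eeshan2001/DSA_AbdulBari | Day-5-slot-2/vijay_industrialist.py | getMaxVol
-- ===== SOURCE A (Python) =====
-- def getMaxVol(money, price, volume, n):
--     K = []
--     for i in range(n + 1):
--        temp = []
--        for j in range(money + 1):
--            temp.append(0)
--        K.append(temp)
--     for i in range(n + 1):
--        for m in range(money + 1):
--            if i == 0 or m == 0:
--                K[i][m] = 0
--            elif price[i - 1] <= m:
--                K[i][m] = max(volume[i - 1] + K[i - 1][m - price[i - 1]], K[i - 1][m])
--            else:
--                K[i][m] = K[i - 1][m]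
--     return K[n][money]
-- ===== SOURCE B (Python) =====
-- def getMaxVol(money, price, volume, n):
--     memo = {}
--
--     def solve(i, m):
--         if i == 0 or m == 0:
--             return 0
--         key = (i, m)
--         if key in memo:
--             return memo[key]
--         if price[i - 1] <= m:
--             res = max(volume[i - 1] + solve(i - 1, m - price[i - 1]), solve(i - 1, m))
--         else:
--             res = solve(i - 1, m)
--         memo[key] = res
--         return res
--
--     return solve(n, money)
-- ===== Notes on version B (the rewrite author's own statement) =====
-- stated objective: alternative
-- what changed: Replaces the bottom-up fill of the whole (n+1)x(money+1) table with top-down memoized recursion solve(i, m) over the same recurrence, keyed on (i, m) in a dict, so only the states reachable from (n, money) are computed.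
import Mathlib
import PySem

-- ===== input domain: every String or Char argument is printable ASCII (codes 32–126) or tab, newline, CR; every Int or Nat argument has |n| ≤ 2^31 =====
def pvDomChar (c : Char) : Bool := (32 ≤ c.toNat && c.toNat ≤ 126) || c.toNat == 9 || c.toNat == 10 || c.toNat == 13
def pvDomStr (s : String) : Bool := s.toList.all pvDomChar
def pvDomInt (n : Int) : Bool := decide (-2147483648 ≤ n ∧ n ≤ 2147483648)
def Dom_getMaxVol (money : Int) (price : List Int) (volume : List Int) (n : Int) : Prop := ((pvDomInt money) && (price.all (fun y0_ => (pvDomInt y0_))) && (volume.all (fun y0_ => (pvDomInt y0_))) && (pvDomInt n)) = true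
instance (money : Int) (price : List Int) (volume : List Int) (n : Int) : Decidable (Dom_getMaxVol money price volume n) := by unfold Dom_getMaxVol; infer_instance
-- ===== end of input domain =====

-- B replaces A's bottom-up (n+1)×(money+1) table fill with top-down memoized
-- recursion over the same knapsack recurrence, computing only the (i, m) states
-- reachable from (n, money) (alternative decomposition).


-- ===== PORT A =====
-- Literal port of A: build the zero table with the two append loops, then fill it
-- with the nested range loops; indexing/assignment is PySem.List.pyGetD/List.set
-- (the pyGetD defaults mark exactly the accesses where Python raises — outside Pre_;
-- loop indices come from pyRange 0 _ 1, hence are ≥ 0, so '.toNat' in List.set is exact).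
-- A-side helper: the body of A's inner loop 'K[i][m] = ...' verbatim
def stepA (price volume : List Int) (i : Int) (K : List (List Int)) (m : Int) : List (List Int) :=
  let v : Int :=
    if i = 0 ∨ m = 0 then 0
    else if (PySem.List.pyGetD price (i - 1) 0) ≤ m then
      max ((PySem.List.pyGetD volume (i - 1) 0) +
            (PySem.List.pyGetD (PySem.List.pyGetD K (i - 1) []) (m - PySem.List.pyGetD price (i - 1) 0) 0))
          (PySem.List.pyGetD (PySem.List.pyGetD K (i - 1) []) m 0)
    else PySem.List.pyGetD (PySem.List.pyGetD K (i - 1) []) m 0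
  K.set i.toNat ((PySem.List.pyGetD K i []).set m.toNat v)

def getMaxVol (money : Int) (price : List Int) (volume : List Int) (n : Int) : Int :=
  let K0 : List (List Int) :=
    (PySem.List.pyRange 0 (n + 1) 1).foldl
      (fun K _ =>
        K ++ [(PySem.List.pyRange 0 (money + 1) 1).foldl (fun t _ => t ++ [(0 : Int)]) []]) []
  let K : List (List Int) :=
    (PySem.List.pyRange 0 (n + 1) 1).foldl
      (fun K i => (PySem.List.pyRange 0 (money + 1) 1).foldl (stepA price volume i) K) K0
  PySem.List.pyGetD (PySem.List.pyGetD K n []) money 0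

-- ===== PORT B =====
-- solve(i, m) of Source B with the memo dict threaded through explicitly; the recursion
-- is on i as a Nat (Python's i, which Source B only ever calls with 0 ≤ i inside Pre_).
def solveTD (price : List Int) (volume : List Int) :
    Nat → Int → PySem.Dict (Int × Int) Int → Int × PySem.Dict (Int × Int) Int
  | 0, _, memo => (0, memo)
  | i + 1, m, memo =>
    if m = 0 then (0, memo)
    else
      match memo.get? (((i : Int) + 1), m) with
      | some v => (v, memo)
      | none =>
        if (PySem.List.pyGetD price (i : Int) 0) ≤ m then
          let r1 := solveTD price volume i (m - PySem.List.pyGetD price (i : Int) 0) memo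
          let r2 := solveTD price volume i m r1.2
          let res := max ((PySem.List.pyGetD volume (i : Int) 0) + r1.1) r2.1
          (res, r2.2.insert (((i : Int) + 1), m) res)
        else
          let r := solveTD price volume i m memo
          (r.1, r.2.insert (((i : Int) + 1), m) r.1)

def getMaxVol_alt (money : Int) (price : List Int) (volume : List Int) (n : Int) : Int :=
  (solveTD price volume n.toNat money PySem.Dict.empty).1

-- ===== PRECONDITION & SPEC =====
-- Pre_ excludes exactly the inputs on which Python A raises: negative money or n
-- (IndexError on the empty table), and — when both n ≥ 1 and money ≥ 1 so the fill
-- loop really indexes — a price list shorter than n, a negative price among the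
-- first n (table column index out of range at m = money), or a volume list too
-- short for an affordable item (volume[i] is read exactly when price[i] ≤ money).
def Pre_getMaxVol (money : Int) (price : List Int) (volume : List Int) (n : Int) : Prop :=
  0 ≤ money ∧ 0 ≤ n ∧
  (money = 0 ∨ n = 0 ∨
    (n ≤ (price.length : Int) ∧
     (∀ p ∈ price.take n.toNat, 0 ≤ p) ∧
     (∀ i ∈ List.range n.toNat, price.getD i 0 ≤ money → i < volume.length)))
instance (money : Int) (price : List Int) (volume : List Int) (n : Int) : Decidable (Pre_getMaxVol money price volume n) := by unfold Pre_getMaxVol; infer_instance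

def pvWitness_getMaxVol : Int × List Int × List Int × Int := (5, [2, 3], [4, 5], 2)

def Spec_getMaxVol (money : Int) (price : List Int) (volume : List Int) (n : Int) (out : Int) : Prop := out = getMaxVol_alt money price volume n
instance (money : Int) (price : List Int) (volume : List Int) (n : Int) (out : Int) : Decidable (Spec_getMaxVol money price volume n out) := by unfold Spec_getMaxVol; infer_instance

-- ===== CLAIM (what is proved, stated in full; the proofs are below) =====
def Claim_equal_getMaxVol : Prop := ∀ (money : Int) (price : List Int) (volume : List Int) (n : Int), Dom_getMaxVol money price volume n → Pre_getMaxVol money price volume n → Spec_getMaxVol money price volume n (getMaxVol money price volume n)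

-- ===== LEMMAS AND PROOFS =====

-- The common recurrence both programs compute: max volume from the first i items
-- within (Int) budget m, with exactly the ports' guarded list reads.
def bestK (price : List Int) (volume : List Int) : Nat → Int → Int
  | 0, _ => 0
  | i + 1, m =>
    if m = 0 then 0
    else if (PySem.List.pyGetD price (i : Int) 0) ≤ m then
      max ((PySem.List.pyGetD volume (i : Int) 0) + bestK price volume i (m - PySem.List.pyGetD price (i : Int) 0))
          (bestK price volume i m)
    else bestK price volume i m

-- every value stored in the memo is the recurrence's value at its key
def MemoOK (price : List Int) (volume : List Int) (memo : PySem.Dict (Int × Int) Int) : Prop :=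
  ∀ i m v, memo.get? (i, m) = some v → 0 ≤ i ∧ v = bestK price volume i.toNat m

theorem memoOK_insert (price volume : List Int) (memo : PySem.Dict (Int × Int) Int)
    (h : MemoOK price volume memo) (i : Nat) (m : Int) (v : Int)
    (hv : v = bestK price volume (i + 1) m) :
    MemoOK price volume (memo.insert (((i : Int) + 1), m) v) := by
  intro i' m' v' hget
  rw [PySem.Dict.get?_insert] at hget
  split at hget
  · rename_i heq
    cases hget
    have h1 : i' = (i : Int) + 1 := (Prod.mk.injEq .. ▸ heq).1
    have h2 : m' = m := (Prod.mk.injEq .. ▸ heq).2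
    subst h2
    refine ⟨by omega, ?_⟩
    rw [h1]
    have ht : ((i : Int) + 1).toNat = i + 1 := by omega
    rw [ht]; exact hv
  · exact h _ _ _ hget

theorem solveTD_spec (price volume : List Int) :
    ∀ (i : Nat) (m : Int) (memo : PySem.Dict (Int × Int) Int), MemoOK price volume memo →
      (solveTD price volume i m memo).1 = bestK price volume i m ∧
      MemoOK price volume (solveTD price volume i m memo).2 := by
  intro i
  induction i with
  | zero => intro m memo h; exact ⟨rfl, h⟩
  | succ i ih =>
    intro m memo h
    by_cases hm : m = 0
    · subst hm
      simpa [solveTD, bestK] using h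
    · cases hget : memo.get? (((i : Int) + 1), m) with
      | some v =>
        have hv := h _ _ _ hget
        have ht : ((i : Int) + 1).toNat = i + 1 := by omega
        rw [ht] at hv
        constructor
        · simp [solveTD, hm, hget, bestK, hv.2]
        · simp only [solveTD, hm, hget]
          simpa [hm, hget] using h
      | none =>
        by_cases hple : (PySem.List.pyGetD price (i : Int) 0) ≤ m
        · obtain ⟨e1, k1⟩ := ih (m - PySem.List.pyGetD price (i : Int) 0) memo h
          obtain ⟨e2, k2⟩ := ih m _ k1
          have hbest : max ((PySem.List.pyGetD volume (i : Int) 0) +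
                (solveTD price volume i (m - PySem.List.pyGetD price (i : Int) 0) memo).1)
              (solveTD price volume i m
                (solveTD price volume i (m - PySem.List.pyGetD price (i : Int) 0) memo).2).1
              = bestK price volume (i + 1) m := by
            rw [e1, e2, bestK, if_neg hm, if_pos hple]
          constructor
          · simp only [solveTD, if_neg hm, hget, if_pos hple]
            exact hbest
          · simp only [solveTD, if_neg hm, hget, if_pos hple]
            exact memoOK_insert price volume _ k2 i m _ hbest
        · obtain ⟨e, k⟩ := ih m memo h
          have hbest : (solveTD price volume i m memo).1 = bestK price volume (i + 1) m := by
            rw [e, bestK, if_neg hm, if_neg hple]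
          constructor
          · simp only [solveTD, if_neg hm, hget, if_neg hple]
            exact hbest
          · simp only [solveTD, if_neg hm, hget, if_neg hple]
            exact memoOK_insert price volume _ k i m _ hbest

theorem alt_eq_bestK (money : Int) (price volume : List Int) (n : Int) :
    getMaxVol_alt money price volume n = bestK price volume n.toNat money := by
  have h0 : MemoOK price volume PySem.Dict.empty := by
    intro i m v hget
    simp [PySem.Dict.get?_empty] at hget
  exact (solveTD_spec price volume n.toNat money _ h0).1

-- ===== A-side helpers (proof only) =====

def rowBest (price volume : List Int) (M : Nat) (j : Nat) : List Int :=
  (List.range (M+1)).map (fun s : Nat => bestK price volume j (s : Int))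

def mixRow (price volume : List Int) (M : Nat) (j : Nat) (s : Nat) : List Int :=
  (List.range (M+1)).map (fun m : Nat => if m < s then bestK price volume (j+1) (m : Int) else 0)

def Ktab (price volume : List Int) (M N : Nat) (t : Nat) : List (List Int) :=
  (List.range (N+1)).map (fun j => if j < t then rowBest price volume M j else List.replicate (M+1) (0 : Int))

theorem set_getD_self' (l : List (List Int)) (n : Nat) (h : n < l.length) :
    l.set n (l.getD n []) = l := by
  apply List.ext_getElem?
  intro k
  rw [List.getElem?_set]
  split
  · rename_i hk; subst hk; simp [List.getD_eq_getElem?_getD, h]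
  · rfl

theorem rowBest_getD (price volume : List Int) (M j s : Nat) (hs : s ≤ M) :
    (rowBest price volume M j).getD s 0 = bestK price volume j (s : Int) := by
  rw [List.getD_eq_getElem?_getD, rowBest, List.getElem?_map,
      List.getElem?_range (show s < M + 1 by omega)]
  rfl

theorem rowBest_zero (price volume : List Int) (M : Nat) :
    rowBest price volume M 0 = List.replicate (M+1) 0 := by
  rw [rowBest, List.eq_replicate_iff]
  refine ⟨by simp, ?_⟩
  intro b hb
  simp only [List.mem_map] at hb
  obtain ⟨k, _, hk⟩ := hb
  rw [← hk, bestK]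

theorem mixRow_zero (price volume : List Int) (M j : Nat) :
    mixRow price volume M j 0 = List.replicate (M+1) 0 := by
  rw [mixRow, List.eq_replicate_iff]
  refine ⟨by simp, ?_⟩
  intro b hb
  simp only [List.mem_map] at hb
  obtain ⟨k, _, hk⟩ := hb
  omega

theorem mixRow_full (price volume : List Int) (M j : Nat) :
    mixRow price volume M j (M+1) = rowBest price volume M (j+1) := by
  rw [mixRow, rowBest]
  apply List.map_congr_left
  intro k hk
  simp only [List.mem_range] at hk
  rw [if_pos hk]

theorem mixRow_set (price volume : List Int) (M j s : Nat) (hs : s ≤ M) :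
    (mixRow price volume M j s).set s (bestK price volume (j+1) (s : Int))
      = mixRow price volume M j (s+1) := by
  apply List.ext_getElem?
  intro k
  rw [List.getElem?_set]
  by_cases hk : k < M + 1
  · rw [mixRow, mixRow, List.getElem?_map, List.getElem?_map, List.getElem?_range hk]
    split
    · rename_i he
      subst he
      rw [if_pos (by simp only [List.length_map, List.length_range]; omega)]
      simp only [Option.map_some]
      congr 1
      rw [if_pos (by omega)]
    · rename_i he
      simp only [Option.map_some]
      congr 1
      by_cases h1 : k < s
      · rw [if_pos h1, if_pos (by omega)]
      · rw [if_neg h1, if_neg (by omega)]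
  · have h1 : (mixRow price volume M j s).length ≤ k := by
      simp [mixRow]; omega
    have h2 : (mixRow price volume M j (s+1)).length ≤ k := by
      simp [mixRow]; omega
    rw [List.getElem?_eq_none h1, List.getElem?_eq_none h2]
    split
    · rename_i he; subst he; rw [if_neg (by simp [mixRow]; omega)]
    · rfl
theorem Ktab_length (price volume : List Int) (M N t : Nat) :
    (Ktab price volume M N t).length = N + 1 := by simp [Ktab]

theorem Ktab_getD_lt (price volume : List Int) (M N t j : Nat) (h1 : j < t) (h2 : j < N + 1) :
    (Ktab price volume M N t).getD j [] = rowBest price volume M j := by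
  rw [List.getD_eq_getElem?_getD, Ktab, List.getElem?_map, List.getElem?_range h2]
  simp only [Option.map_some, Option.getD_some]
  rw [if_pos h1]

theorem Ktab_getD_ge (price volume : List Int) (M N t j : Nat) (h1 : ¬ j < t) (h2 : j < N + 1) :
    (Ktab price volume M N t).getD j [] = List.replicate (M+1) 0 := by
  rw [List.getD_eq_getElem?_getD, Ktab, List.getElem?_map, List.getElem?_range h2]
  simp only [Option.map_some, Option.getD_some]
  rw [if_neg h1]

theorem Ktab_set (price volume : List Int) (M N t : Nat) :
    (Ktab price volume M N t).set t (rowBest price volume M t) = Ktab price volume M N (t+1) := by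
  apply List.ext_getElem?
  intro k
  rw [List.getElem?_set]
  by_cases hk : k < N + 1
  · rw [Ktab, Ktab, List.getElem?_map, List.getElem?_map, List.getElem?_range hk]
    split
    · rename_i he
      subst he
      rw [if_pos (by simp only [List.length_map, List.length_range]; omega)]
      simp only [Option.map_some]
      congr 1
      rw [if_pos (by omega)]
    · rename_i he
      simp only [Option.map_some]
      congr 1
      by_cases h1 : k < t
      · rw [if_pos h1, if_pos (by omega)]
      · rw [if_neg h1, if_neg (by omega)]
  · have h1 : (Ktab price volume M N t).length ≤ k := by rw [Ktab_length]; omega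
    have h2 : (Ktab price volume M N (t+1)).length ≤ k := by rw [Ktab_length]; omega
    rw [List.getElem?_eq_none h1, List.getElem?_eq_none h2]
    split
    · rename_i he; subst he; rw [if_neg (by rw [Ktab_length]; omega)]
    · rfl

theorem Ktab_one (price volume : List Int) (M N : Nat) :
    Ktab price volume M N 1 = Ktab price volume M N 0 := by
  rw [Ktab, Ktab]
  apply List.map_congr_left
  intro k hk
  by_cases h : k < 1
  · have : k = 0 := by omega
    subst this
    rw [if_pos h, if_neg (by omega), rowBest_zero]
  · rw [if_neg h, if_neg (by omega)]
theorem stepA_mix (price volume : List Int) (M j s : Nat) (hs : s ≤ M)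
    (hpj : s = 0 ∨ 0 ≤ PySem.List.pyGetD price (j : Int) 0)
    (K : List (List Int)) (hlen : j + 1 < K.length)
    (hprev : K.getD j [] = rowBest price volume M j) :
    stepA price volume ((j : Int) + 1) (K.set (j+1) (mixRow price volume M j s)) ((s : Nat) : Int)
      = K.set (j+1) (mixRow price volume M j (s+1)) := by
  have hi1 : ((j : Int) + 1) - 1 = (j : Int) := by omega
  have hK'j : PySem.List.pyGetD (K.set (j+1) (mixRow price volume M j s)) ((j : Int)) []
      = rowBest price volume M j := by
    rw [PySem.List.pyGetD_natCast, List.getD_eq_getElem?_getD,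
        List.getElem?_set_ne (by omega), ← List.getD_eq_getElem?_getD, hprev]
  have hv : (if ((j : Int) + 1) = 0 ∨ ((s : Nat) : Int) = 0 then (0 : Int)
      else if (PySem.List.pyGetD price (((j : Int) + 1) - 1) 0) ≤ ((s : Nat) : Int) then
        max ((PySem.List.pyGetD volume (((j : Int) + 1) - 1) 0) +
              (PySem.List.pyGetD (PySem.List.pyGetD (K.set (j+1) (mixRow price volume M j s)) (((j : Int) + 1) - 1) [])
                (((s : Nat) : Int) - PySem.List.pyGetD price (((j : Int) + 1) - 1) 0) 0))
            (PySem.List.pyGetD (PySem.List.pyGetD (K.set (j+1) (mixRow price volume M j s)) (((j : Int) + 1) - 1) []) ((s : Nat) : Int) 0)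
      else PySem.List.pyGetD (PySem.List.pyGetD (K.set (j+1) (mixRow price volume M j s)) (((j : Int) + 1) - 1) []) ((s : Nat) : Int) 0)
      = bestK price volume (j+1) ((s : Nat) : Int) := by
    rw [hi1, hK'j, bestK]
    by_cases hs0 : s = 0
    · subst hs0
      rw [if_pos (Or.inr (by norm_num)), if_pos (by norm_num)]
    · obtain ⟨q, hq⟩ := Int.eq_ofNat_of_zero_le (hpj.resolve_left hs0)
      rw [hq]
      rw [if_neg (by rintro (h | h) <;> omega),
          if_neg (show ¬((s : Nat) : Int) = 0 by omega)]
      by_cases hple : ((q : Nat) : Int) ≤ ((s : Nat) : Int)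
      · rw [if_pos hple, if_pos hple]
        have hcast : ((s : Nat) : Int) - ((q : Nat) : Int) = (((s - q : Nat)) : Int) := by omega
        rw [hcast, PySem.List.pyGetD_natCast, PySem.List.pyGetD_natCast,
            PySem.List.pyGetD_natCast,
            rowBest_getD price volume M j _ (by omega),
            rowBest_getD price volume M j s hs]
      · rw [if_neg hple, if_neg hple, PySem.List.pyGetD_natCast,
            rowBest_getD price volume M j s hs]
  simp only [stepA]
  rw [hv]
  have hts : ((s : Nat) : Int).toNat = s := by omega
  have htj : ((j : Int) + 1).toNat = j + 1 := by omega
  have hcj : ((j : Int) + 1) = (((j + 1 : Nat)) : Int) := by omega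
  rw [hts, htj, hcj, PySem.List.pyGetD_natCast]
  have hrow : (K.set (j+1) (mixRow price volume M j s)).getD (j+1) [] = mixRow price volume M j s := by
    rw [List.getD_eq_getElem?_getD, List.getElem?_set_self hlen]
    rfl
  rw [hrow, List.set_set, mixRow_set price volume M j s hs]
theorem stepA_zero (price volume : List Int) (K : List (List Int)) (m : Int) :
    stepA price volume 0 K m = K.set 0 ((PySem.List.pyGetD K 0 []).set m.toNat 0) := by
  simp only [stepA, Int.toNat_zero, true_or, if_true]

theorem innerFoldZero (price volume : List Int) (M : Nat) (K : List (List Int))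
    (hlen : 0 < K.length) (h0 : K.getD 0 [] = List.replicate (M+1) 0) :
    ∀ s : Nat, (PySem.List.pyRange 0 ((s : Nat) : Int) 1).foldl (stepA price volume 0) K = K := by
  intro s
  induction s with
  | zero =>
    rw [show ((0 : Nat) : Int) = 0 by norm_num, PySem.List.pyRange_one_eq_nil le_rfl]
    rfl
  | succ s ih =>
    have hc : ((s + 1 : Nat) : Int) = ((s : Nat) : Int) + 1 := by push_cast; ring
    rw [hc, PySem.List.pyRange_one_succ_right (by positivity), List.foldl_append, ih]
    simp only [List.foldl_cons, List.foldl_nil]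
    rw [stepA_zero, PySem.List.pyGetD_zero, h0, List.set_replicate_self, ← h0]
    exact set_getD_self' K 0 hlen

theorem innerFoldPos (price volume : List Int) (M j : Nat) (K : List (List Int))
    (hlen : j + 1 < K.length)
    (hprev : K.getD j [] = rowBest price volume M j)
    (hrow : K.getD (j+1) [] = List.replicate (M+1) 0)
    (hpj : M = 0 ∨ 0 ≤ PySem.List.pyGetD price (j : Int) 0) :
    ∀ s : Nat, s ≤ M + 1 →
      (PySem.List.pyRange 0 ((s : Nat) : Int) 1).foldl (stepA price volume ((j : Int) + 1)) K
        = K.set (j+1) (mixRow price volume M j s) := by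
  intro s
  induction s with
  | zero =>
    intro _
    rw [show ((0 : Nat) : Int) = 0 by norm_num, PySem.List.pyRange_one_eq_nil le_rfl]
    rw [List.foldl_nil, mixRow_zero, ← hrow]
    exact (set_getD_self' K (j+1) hlen).symm
  | succ s ih =>
    intro hs1
    have hc : ((s + 1 : Nat) : Int) = ((s : Nat) : Int) + 1 := by push_cast; ring
    rw [hc, PySem.List.pyRange_one_succ_right (by positivity), List.foldl_append,
        ih (by omega)]
    simp only [List.foldl_cons, List.foldl_nil]
    refine stepA_mix price volume M j s (by omega) ?_ K hlen hprev
    rcases hpj with h | h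
    · left; omega
    · right; exact h

theorem outerFold (price volume : List Int) (M N : Nat)
    (hp : ∀ j, j < N → (M = 0 ∨ 0 ≤ PySem.List.pyGetD price (j : Int) 0)) :
    ∀ t : Nat, t ≤ N + 1 →
      (PySem.List.pyRange 0 ((t : Nat) : Int) 1).foldl
        (fun K i => (PySem.List.pyRange 0 (((M + 1 : Nat)) : Int) 1).foldl (stepA price volume i) K)
        (Ktab price volume M N 0)
      = Ktab price volume M N t := by
  intro t
  induction t with
  | zero =>
    intro _
    rw [show ((0 : Nat) : Int) = 0 by norm_num, PySem.List.pyRange_one_eq_nil le_rfl]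
    rfl
  | succ t ih =>
    intro ht1
    have hc : ((t + 1 : Nat) : Int) = ((t : Nat) : Int) + 1 := by push_cast; ring
    rw [hc, PySem.List.pyRange_one_succ_right (by positivity), List.foldl_append,
        ih (by omega)]
    simp only [List.foldl_cons, List.foldl_nil]
    cases t with
    | zero =>
      rw [show ((0 : Nat) : Int) = 0 by norm_num]
      rw [innerFoldZero price volume M (Ktab price volume M N 0) (by rw [Ktab_length]; omega)
            (Ktab_getD_ge price volume M N 0 0 (by omega) (by omega)) (M+1)]
      exact (Ktab_one price volume M N).symm
    | succ j =>
      have hcj : ((j + 1 : Nat) : Int) = ((j : Nat) : Int) + 1 := by push_cast; ring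
      rw [hcj]
      rw [innerFoldPos price volume M j (Ktab price volume M N (j+1))
            (by rw [Ktab_length]; omega)
            (Ktab_getD_lt price volume M N (j+1) j (by omega) (by omega))
            (Ktab_getD_ge price volume M N (j+1) (j+1) (by omega) (by omega))
            (hp j (by omega)) (M+1) le_rfl]
      rw [mixRow_full]
      exact Ktab_set price volume M N (j+1)
theorem Ktab_zero_rep (price volume : List Int) (M N : Nat) :
    Ktab price volume M N 0 = List.replicate (N+1) (List.replicate (M+1) (0 : Int)) := by
  rw [Ktab]
  have h : ∀ j ∈ List.range (N+1),
      (if j < 0 then rowBest price volume M j else List.replicate (M+1) (0 : Int))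
        = List.replicate (M+1) (0 : Int) := by
    intro j _; rw [if_neg (by omega)]
  rw [List.map_congr_left h, List.map_const', List.length_range]

theorem a_eq_bestK (money : Int) (price volume : List Int) (n : Int)
    (hm : 0 ≤ money) (hn : 0 ≤ n)
    (hp : ∀ j, j < n.toNat → (money = 0 ∨ 0 ≤ PySem.List.pyGetD price (j : Int) 0)) :
    getMaxVol money price volume n = bestK price volume n.toNat money := by
  obtain ⟨N, rfl⟩ := Int.eq_ofNat_of_zero_le hn
  obtain ⟨M, rfl⟩ := Int.eq_ofNat_of_zero_le hm
  simp only [Int.toNat_natCast] at hp ⊢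
  have hM : ((M : Nat) : Int) + 1 = (((M + 1 : Nat)) : Int) := by omega
  have hN : ((N : Nat) : Int) + 1 = (((N + 1 : Nat)) : Int) := by omega
  simp only [getMaxVol]
  rw [hM, hN]
  have hinit :
      (PySem.List.pyRange 0 (((N + 1 : Nat)) : Int) 1).foldl
        (fun K _ =>
          K ++ [(PySem.List.pyRange 0 (((M + 1 : Nat)) : Int) 1).foldl (fun t _ => t ++ [(0 : Int)]) []]) []
      = Ktab price volume M N 0 := by
    rw [PySem.List.foldl_append_singleton_eq_map, PySem.List.foldl_append_singleton_eq_map]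
    simp only [List.nil_append]
    rw [List.map_const', List.map_const', PySem.List.length_pyRange_one,
        PySem.List.length_pyRange_one, Ktab_zero_rep]
    congr 1
  rw [hinit, outerFold price volume M N
        (fun j hj => by rcases hp j hj with h | h
                        · left; omega
                        · right; exact h) (N + 1) le_rfl,
      PySem.List.pyGetD_natCast, PySem.List.pyGetD_natCast,
      Ktab_getD_lt price volume M N (N + 1) N (by omega) (by omega),
      rowBest_getD price volume M N M le_rfl]

-- ===== VERDICT (by name: the statement is the Claim_ definition above) =====
theorem getMaxVol_spec : Claim_equal_getMaxVol := by
  intro money price volume n _hdom hpre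
  obtain ⟨hm, hn, hcase⟩ := hpre
  unfold Spec_getMaxVol
  rw [alt_eq_bestK]
  apply a_eq_bestK money price volume n hm hn
  intro j hj
  rcases hcase with h0 | h0 | ⟨hlen, htake, _⟩
  · left; exact h0
  · exfalso; omega
  · right
    have hjl : j < price.length := by omega
    have hlt : j < (price.take n.toNat).length := by
      rw [List.length_take]; omega
    have hmem := List.getElem_mem hlt
    rw [List.getElem_take] at hmem
    rw [PySem.List.pyGetD_natCast, List.getD_eq_getElem?_getD,
        List.getElem?_eq_getElem hjl, Option.getD_some]
    exact htake _ hmem
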